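-- pv_equiv track=rewrite | github.com/DrewYomantas/Clarion | backend/services/benchmark_engine.py | _get_bounded_clause_text
-- ===== SOURCE A (Python) =====
-- CLAUSE_BOUNDARY_CHARS = {".", "!", "?", ";", ",", "\n", "\r", ":", "(", ")"}
--
-- INLINE_BOUNDARY_MARKERS = (" and ", " but ", " or ", " however ", " although ", " though ", " while ")
--
-- def _get_bounded_clause_text(
--     text_lower: str,
--     phrase_char_idx: int,
--     phrase_len: int,
--     before_only: bool = False,
-- ) -> str:
--     """Return nearby raw text without crossing punctuation clause boundaries."""
--     left = phrase_char_idx - 1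
--     while left >= 0:
--         if text_lower[left] in CLAUSE_BOUNDARY_CHARS:
--             break
--         left -= 1
--     left_text = text_lower[left + 1:phrase_char_idx]
--     for marker in INLINE_BOUNDARY_MARKERS:
--         marker_idx = left_text.rfind(marker)
--         if marker_idx != -1:
--             left_text = left_text[marker_idx + len(marker):]
--             break
--
--     if before_only:
--         return left_text
--
--     right = phrase_char_idx + phrase_len
--     while right < len(text_lower):
--         if text_lower[right] in CLAUSE_BOUNDARY_CHARS:
--             break
--         right += 1
--     right_text = text_lower[phrase_char_idx + phrase_len:right]
--     for marker in INLINE_BOUNDARY_MARKERS: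
--         marker_idx = right_text.find(marker)
--         if marker_idx != -1:
--             right_text = right_text[:marker_idx]
--             break
--     return f"{left_text} {right_text}".strip()
-- ===== SOURCE B (Python) =====
-- CLAUSE_BOUNDARY_CHARS = {".", "!", "?", ";", ",", "\n", "\r", ":", "(", ")"}
--
-- INLINE_BOUNDARY_MARKERS = (" and ", " but ", " or ", " however ", " although ", " though ", " while ")
--
--
-- def _segments(s):
--     """One forward pass: split s into the runs between clause-boundary characters."""
--     segs = []
--     cur = []
--     for ch in s:
--         if ch in CLAUSE_BOUNDARY_CHARS:
--             segs.append("".join(cur))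
--             cur = []
--         else:
--             cur.append(ch)
--     segs.append("".join(cur))
--     return segs
--
--
-- def _get_bounded_clause_text(
--     text_lower: str,
--     phrase_char_idx: int,
--     phrase_len: int,
--     before_only: bool = False,
-- ) -> str:
--     left_text = _segments(text_lower[:phrase_char_idx])[-1]
--     hit = next((m for m in INLINE_BOUNDARY_MARKERS if left_text.rfind(m) != -1), None)
--     if hit is not None:
--         left_text = left_text[left_text.rfind(hit) + len(hit):]
--
--     if before_only:
--         return left_text
--
--     right_text = _segments(text_lower[phrase_char_idx + phrase_len:])[0]
--     hit = next((m for m in INLINE_BOUNDARY_MARKERS if right_text.find(m) != -1), None)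
--     if hit is not None:
--         right_text = right_text[:right_text.find(hit)]
--     return f"{left_text} {right_text}".strip()
-- ===== Notes on version B (the rewrite author's own statement) =====
-- stated objective: alternative
-- what changed: Replaces A's two char-by-char boundary scans (backward from the phrase, forward after it) with a single forward segment-splitting pass over each slice (last segment of the prefix, first segment of the suffix), and the break-on-first-marker loops with a find-first-matching-marker step.
-- outside the precondition, e.g. on _get_bounded_clause_text('ab.cd', -2, 1, False): A returns '', B returns 'd'; on _get_bounded_clause_text('ab.cd', 3, -4, False): A returns '', B returns 'd'
import Mathlib
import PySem

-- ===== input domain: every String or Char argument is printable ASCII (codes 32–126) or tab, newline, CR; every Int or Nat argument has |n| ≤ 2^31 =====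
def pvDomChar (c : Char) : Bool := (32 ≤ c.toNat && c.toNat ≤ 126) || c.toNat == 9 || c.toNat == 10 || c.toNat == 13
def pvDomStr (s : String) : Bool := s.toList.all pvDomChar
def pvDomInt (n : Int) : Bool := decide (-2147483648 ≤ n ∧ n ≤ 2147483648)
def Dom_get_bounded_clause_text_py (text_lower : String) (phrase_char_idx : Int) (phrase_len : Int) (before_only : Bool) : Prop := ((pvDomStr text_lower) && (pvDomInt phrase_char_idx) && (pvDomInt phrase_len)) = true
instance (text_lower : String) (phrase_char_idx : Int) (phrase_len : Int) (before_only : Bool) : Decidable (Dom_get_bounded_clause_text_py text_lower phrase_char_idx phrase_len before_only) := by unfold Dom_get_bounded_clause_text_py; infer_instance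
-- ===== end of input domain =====

-- B replaces A's two char-by-char boundary scans by one forward segment-splitting pass
-- (take the last segment of the prefix / the first segment of the suffix) and the
-- break-on-first-marker loops by a single find-first-matching-marker step; objective: alternative decomposition.

-- module constants shared by both ports
def pvBnd (c : Char) : Bool :=
  ['.', '!', '?', ';', ',', '\n', '\r', ':', '(', ')'].contains c

def pvMarkers : List (List Char) :=
  [" and ".toList, " but ".toList, " or ".toList, " however ".toList,
   " although ".toList, " though ".toList, " while ".toList]

-- ===== PORT A =====
-- while left >= 0: break on boundary char, else left -= 1
def pvALeft (cs : List Char) (left : Int) : Int :=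
  if h : 0 ≤ left then
    match PySem.List.pyGet? cs left with
    | none => left  -- Python raises IndexError here; such inputs are excluded by Pre_
    | some c => if pvBnd c then left else pvALeft cs (left - 1)
  else left
termination_by (left + 1).toNat
decreasing_by simp_wf; omega

-- while right < len(text_lower): break on boundary char, else right += 1
def pvARight (cs : List Char) (right : Int) : Int :=
  if h : right < cs.length then
    match PySem.List.pyGet? cs right with
    | none => right  -- Python raises IndexError here; such inputs are excluded by Pre_
    | some c => if pvBnd c then right else pvARight cs (right + 1)
  else right
termination_by ((cs.length : Int) - right).toNat
decreasing_by simp_wf; omega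

-- for marker in INLINE_BOUNDARY_MARKERS: rfind, cut, break
def pvACutLeft (lt : List Char) : List (List Char) → List Char
  | [] => lt
  | m :: ms =>
      if PySem.Chars.rfind lt m != -1 then
        PySem.List.slice lt (some (PySem.Chars.rfind lt m + m.length)) none
      else pvACutLeft lt ms

-- for marker in INLINE_BOUNDARY_MARKERS: find, cut, break
def pvACutRight (rt : List Char) : List (List Char) → List Char
  | [] => rt
  | m :: ms =>
      if PySem.Chars.find rt m != -1 then
        PySem.List.slice rt none (some (PySem.Chars.find rt m))
      else pvACutRight rt ms

def get_bounded_clause_text_py (text_lower : String) (phrase_char_idx : Int) (phrase_len : Int) (before_only : Bool) : String :=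
  let cs := text_lower.toList
  let left := pvALeft cs (phrase_char_idx - 1)
  let left_text := pvACutLeft (PySem.List.slice cs (some (left + 1)) (some phrase_char_idx)) pvMarkers
  if before_only then String.mk left_text
  else
    let r := pvARight cs (phrase_char_idx + phrase_len)
    let right_text := pvACutRight (PySem.List.slice cs (some (phrase_char_idx + phrase_len)) (some r)) pvMarkers
    String.mk (PySem.Chars.strip (left_text ++ ' ' :: right_text))

-- ===== PORT B =====
-- _segments: one forward pass accumulating (finished segments, current segment)
def pvSegs (s : List Char) : List (List Char) :=
  let st := s.foldl
    (fun (p : List (List Char) × List Char) ch =>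
      if pvBnd ch then (p.1 ++ [p.2], ([] : List Char)) else (p.1, p.2 ++ [ch]))
    ([], [])
  st.1 ++ [st.2]

def get_bounded_clause_text_py_alt (text_lower : String) (phrase_char_idx : Int) (phrase_len : Int) (before_only : Bool) : String :=
  let cs := text_lower.toList
  -- _segments(text_lower[:phrase_char_idx])[-1]  (the segment list is never empty, so [-1] never raises)
  let lt0 := (PySem.List.pyGet? (pvSegs (PySem.List.slice cs none (some phrase_char_idx))) (-1)).getD []
  let left_text :=
    match pvMarkers.find? (fun m => PySem.Chars.rfind lt0 m != -1) with
    | some m => PySem.List.slice lt0 (some (PySem.Chars.rfind lt0 m + m.length)) none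
    | none => lt0
  if before_only then String.mk left_text
  else
    -- _segments(text_lower[phrase_char_idx + phrase_len:])[0]
    let rt0 := (PySem.List.pyGet? (pvSegs (PySem.List.slice cs (some (phrase_char_idx + phrase_len)) none)) 0).getD []
    let right_text :=
      match pvMarkers.find? (fun m => PySem.Chars.find rt0 m != -1) with
      | some m => PySem.List.slice rt0 none (some (PySem.Chars.find rt0 m))
      | none => rt0
    String.mk (PySem.Chars.strip (left_text ++ ' ' :: right_text))

-- ===== PRECONDITION & SPEC =====
-- Pre_ restricts to the natural domain of a phrase position: a phrase index inside the text and a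
-- right end phrase_char_idx + phrase_len not left of the text start (any phrase_len if only the
-- left side is asked for).  A raises IndexError when phrase_char_idx > len(text_lower) and when the
-- right-hand scan starts below -len(text_lower); on a negative phrase_char_idx (or a right end in
-- [-len, 0)) A's value comes from Python's negative-index wraparound / empty-slice accidents,
-- outside the natural domain.
def Pre_get_bounded_clause_text_py (text_lower : String) (phrase_char_idx : Int) (phrase_len : Int) (before_only : Bool) : Prop :=
  0 ≤ phrase_char_idx ∧ phrase_char_idx ≤ PySem.Str.len text_lower ∧
    (before_only = true ∨ 0 ≤ phrase_char_idx + phrase_len)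
instance (text_lower : String) (phrase_char_idx : Int) (phrase_len : Int) (before_only : Bool) : Decidable (Pre_get_bounded_clause_text_py text_lower phrase_char_idx phrase_len before_only) := by unfold Pre_get_bounded_clause_text_py; infer_instance

def pvWitness_get_bounded_clause_text_py : String × Int × Int × Bool := ("a.b and c", 8, 1, false)

def Spec_get_bounded_clause_text_py (text_lower : String) (phrase_char_idx : Int) (phrase_len : Int) (before_only : Bool) (out : String) : Prop := out = get_bounded_clause_text_py_alt text_lower phrase_char_idx phrase_len before_only
instance (text_lower : String) (phrase_char_idx : Int) (phrase_len : Int) (before_only : Bool) (out : String) : Decidable (Spec_get_bounded_clause_text_py text_lower phrase_char_idx phrase_len before_only out) := by unfold Spec_get_bounded_clause_text_py; infer_instance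

-- ===== CLAIM (what is proved, stated in full; the proofs are below) =====
def Claim_equal_get_bounded_clause_text_py : Prop := ∀ (text_lower : String) (phrase_char_idx : Int) (phrase_len : Int) (before_only : Bool), Dom_get_bounded_clause_text_py text_lower phrase_char_idx phrase_len before_only → Pre_get_bounded_clause_text_py text_lower phrase_char_idx phrase_len before_only → Spec_get_bounded_clause_text_py text_lower phrase_char_idx phrase_len before_only (get_bounded_clause_text_py text_lower phrase_char_idx phrase_len before_only)

-- ===== LEMMAS AND PROOFS =====

def pvNB (c : Char) : Bool := !pvBnd c

-- the clause text left of a position: the suffix of s after its last boundary char (all of s if none)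
def pvLastClause (s : List Char) : List Char := (s.reverse.takeWhile pvNB).reverse

-- recursive characterisation of pvSegs's foldl
def pvSegsFrom (cur : List Char) : List Char → List (List Char)
  | [] => [cur]
  | c :: t => if pvBnd c then cur :: pvSegsFrom [] t else pvSegsFrom (cur ++ [c]) t

lemma pvSegs_foldl (s : List Char) : ∀ (acc : List (List Char)) (cur : List Char),
    (s.foldl (fun (p : List (List Char) × List Char) ch =>
      if pvBnd ch then (p.1 ++ [p.2], ([] : List Char)) else (p.1, p.2 ++ [ch])) (acc, cur)).1 ++
    [(s.foldl (fun (p : List (List Char) × List Char) ch =>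
      if pvBnd ch then (p.1 ++ [p.2], ([] : List Char)) else (p.1, p.2 ++ [ch])) (acc, cur)).2]
      = acc ++ pvSegsFrom cur s := by
  induction s with
  | nil => intro acc cur; simp [pvSegsFrom]
  | cons c t ih =>
      intro acc cur
      by_cases h : pvBnd c = true
      · simp [pvSegsFrom, h, List.foldl_cons, ih]
      · simp [pvSegsFrom, h, List.foldl_cons, ih]

lemma pvSegsFrom_head (s : List Char) : ∀ cur,
    (pvSegsFrom cur s).head? = some (cur ++ s.takeWhile pvNB) := by
  induction s with
  | nil => intro cur; simp [pvSegsFrom]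
  | cons c t ih =>
      intro cur
      by_cases h : pvBnd c = true
      · simp [pvSegsFrom, h, pvNB]
      · simp [pvSegsFrom, h, ih, pvNB]

lemma pvTW_all {p : Char → Bool} (l r : List Char) (h : ∀ x ∈ l, p x = true) :
    (l ++ r).takeWhile p = l ++ r.takeWhile p := by
  rw [List.takeWhile_append]
  rw [if_pos]
  rw [List.takeWhile_eq_self_iff.2 h]

lemma pvTW_stop {p : Char → Bool} (l r : List Char) (h : ¬ ∀ x ∈ l, p x = true) :
    (l ++ r).takeWhile p = l.takeWhile p := by
  rw [List.takeWhile_append, if_neg]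
  intro hlen
  exact h (List.takeWhile_eq_self_iff.1 ((List.takeWhile_prefix p).eq_of_length hlen))

lemma pvSegsFrom_last (s : List Char) : ∀ cur,
    (pvSegsFrom cur s).getLast? = some (if s.any pvBnd then pvLastClause s else cur ++ s) := by
  induction s with
  | nil => intro cur; simp [pvSegsFrom]
  | cons c t ih =>
      intro cur
      by_cases h : pvBnd c = true
      · rw [pvSegsFrom, if_pos h]
        have hne : pvSegsFrom [] t ≠ [] := by
          intro hn; have := pvSegsFrom_head t []; rw [hn] at this; simp at this
        rw [List.getLast?_cons, ih []]
        simp only [Option.getD_some]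
        have hany : (c :: t).any pvBnd = true := by simp [h]
        rw [if_pos hany]
        by_cases ht : t.any pvBnd = true
        · rw [if_pos ht]
          congr 1
          unfold pvLastClause
          rw [List.reverse_cons, pvTW_stop]
          intro hall
          rcases List.any_eq_true.1 ht with ⟨x, hx, hbx⟩
          have := hall x (by simpa using List.mem_reverse.2 hx)
          simp [pvNB, hbx] at this
        · rw [if_neg ht]
          unfold pvLastClause
          rw [List.reverse_cons, pvTW_all]
          · simp [pvNB, h]
          · intro x hx
            simp only [List.mem_reverse] at hx
            have hb : pvBnd x = false :=
              Bool.not_eq_true _ ▸ (fun hc => ht (List.any_eq_true.2 ⟨x, hx, hc⟩))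
            simp [pvNB, hb]
      · simp only [Bool.not_eq_true] at h
        rw [pvSegsFrom, if_neg (by simp [h]), ih]
        have hany : (c :: t).any pvBnd = t.any pvBnd := by simp [h]
        rw [hany]
        by_cases ht : t.any pvBnd = true
        · rw [if_pos ht, if_pos ht]
          congr 1
          unfold pvLastClause
          rw [List.reverse_cons, pvTW_stop]
          intro hall
          rcases List.any_eq_true.1 ht with ⟨x, hx, hbx⟩
          have := hall x (by simpa using List.mem_reverse.2 hx)
          simp [pvNB, hbx] at this
        · rw [if_neg ht, if_neg ht]
          simp

lemma pvALeft_bounds (cs : List Char) (l : Int) (h : -1 ≤ l) :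
    -1 ≤ pvALeft cs l ∧ pvALeft cs l ≤ l := by
  fun_induction pvALeft cs l with
  | case1 l h hnone => omega
  | case2 l h c hc hb => omega
  | case3 l h c hc hb ih => omega
  | case4 l h => omega

lemma pvARight_ge (cs : List Char) (r : Int) : r ≤ pvARight cs r := by
  fun_induction pvARight cs r with
  | case1 r h hnone => omega
  | case2 r h c hc hb => omega
  | case3 r h c hc hb ih => omega
  | case4 r h => omega

lemma pvARight_le (cs : List Char) (r : Int) (h : r ≤ cs.length) : pvARight cs r ≤ cs.length := by
  fun_induction pvARight cs r with
  | case1 r h hnone => omega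
  | case2 r h c hc hb => omega
  | case3 r h c hc hb ih => exact ih (by omega)
  | case4 r h => omega

lemma pvARight_spec (cs : List Char) : ∀ (k m : Nat), cs.length - m ≤ k →
    PySem.List.slice cs (some (m:Int)) (some (pvARight cs (m:Int))) =
      (cs.drop m).takeWhile pvNB := by
  intro k
  induction k with
  | zero =>
      intro m hm
      have hml : cs.length ≤ m := by omega
      rw [pvARight, dif_neg (by exact_mod_cast Nat.not_lt.2 hml)]
      rw [PySem.List.slice_natCast, List.drop_eq_nil_of_le hml]
      simp
  | succ k ih =>
      intro m hm
      by_cases h : m < cs.length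
      · rw [pvARight, dif_pos (by exact_mod_cast h)]
        rw [PySem.List.pyGet?_natCast, List.getElem?_eq_getElem h]
        by_cases hb : pvBnd cs[m] = true
        · simp only [hb, if_true]
          rw [PySem.List.slice_natCast]
          rw [List.drop_eq_getElem_cons h]
          simp [pvNB, hb]
        · dsimp only
          rw [if_neg hb]
          have e1 : (m:Int) + 1 = ((m+1 : Nat) : Int) := by push_cast; ring
          rw [e1]
          have hge := pvARight_ge cs ((m+1 : Nat) : Int)
          have hle := pvARight_le cs ((m+1 : Nat) : Int) (by exact_mod_cast h)
          set r := pvARight cs ((m+1 : Nat) : Int) with hr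
          have e2 : r = ((r.toNat : Nat) : Int) := by omega
          have ihm := ih (m+1) (by omega)
          rw [← hr] at ihm
          rw [e2] at ihm ⊢
          rw [PySem.List.slice_natCast] at ihm ⊢
          rw [List.drop_eq_getElem_cons h]
          have e3 : r.toNat - m = (r.toNat - (m+1)) + 1 := by omega
          rw [e3, List.take_succ_cons, ihm]
          rw [List.takeWhile_cons_of_pos (by simp [pvNB, hb])]
      · rw [pvARight, dif_neg (by exact_mod_cast h)]
        rw [PySem.List.slice_natCast, List.drop_eq_nil_of_le (by omega)]
        simp

lemma pvALeft_spec (cs : List Char) : ∀ k : Nat, k ≤ cs.length →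
    PySem.List.slice cs (some (pvALeft cs ((k:Int) - 1) + 1)) (some (k:Int)) =
      pvLastClause (cs.take k) := by
  intro k
  induction k with
  | zero =>
      intro _
      have ha : pvALeft cs (((0:Nat):Int) - 1) = -1 := by
        rw [pvALeft, dif_neg (by omega)]; norm_num
      rw [ha, show (-1:Int) + 1 = ((0:Nat):Int) by norm_num, PySem.List.slice_natCast]
      simp [pvLastClause]
  | succ k ih =>
      intro hk
      have hkl : k < cs.length := by omega
      have e1 : ((k+1 : Nat) : Int) - 1 = ((k : Nat) : Int) := by push_cast; ring
      rw [e1, pvALeft, dif_pos (by positivity)]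
      rw [PySem.List.pyGet?_natCast, List.getElem?_eq_getElem hkl]
      have htk : cs.take (k+1) = cs.take k ++ [cs[k]] := by
        rw [List.take_add_one]
        simp [List.getElem?_eq_getElem hkl]
      by_cases hb : pvBnd cs[k] = true
      · simp only [hb, if_true]
        have e2 : (k:Int) + 1 = ((k+1 : Nat) : Int) := by push_cast; ring
        rw [e2, PySem.List.slice_natCast]
        simp only [Nat.sub_self, List.take_zero]
        unfold pvLastClause
        rw [htk, List.reverse_append]
        simp [pvNB, hb]
      · dsimp only
        rw [if_neg hb]
        have hB := pvALeft_bounds cs ((k:Int) - 1) (by omega)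
        set p := pvALeft cs ((k:Int) - 1) with hp
        have ihk := ih (by omega)
        have e3 : p + 1 = (((p+1).toNat : Nat) : Int) := by omega
        rw [e3] at ihk ⊢
        rw [PySem.List.slice_natCast] at ihk ⊢
        have hq : (p+1).toNat ≤ k := by omega
        unfold pvLastClause at ihk ⊢
        rw [htk, List.reverse_append]
        simp only [List.reverse_cons, List.reverse_nil, List.nil_append, List.singleton_append]
        rw [List.takeWhile_cons_of_pos (by simp [pvNB, hb])]
        rw [List.reverse_cons, ← ihk]
        have e4 : k + 1 - (p+1).toNat = (k - (p+1).toNat) + 1 := by omega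
        rw [e4]
        rw [List.take_add_one, List.getElem?_drop]
        have e5 : (p+1).toNat + (k - (p+1).toNat) = k := by omega
        rw [e5, List.getElem?_eq_getElem hkl]
        rfl

lemma pvSegs_eq (s : List Char) : pvSegs s = pvSegsFrom [] s := by
  simpa [pvSegs] using pvSegs_foldl s [] []

lemma pvGet_neg_one {α : Type} (l : List α) (h : l ≠ []) : PySem.List.pyGet? l (-1) = l.getLast? := by
  unfold PySem.List.pyGet? PySem.List.pyIdx?
  rcases l with _ | ⟨a, t⟩
  · simp at h
  · simp only [List.length_cons]
    split_ifs with h1 h2 <;> try omega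
    simp only [Option.bind_some]
    have : t.length + 1 - (-(-1:Int)).toNat = t.length := by omega
    rw [this, List.getLast?_eq_getElem?]
    simp

lemma pvGet_zero {α : Type} (l : List α) : PySem.List.pyGet? l 0 = l.head? := by
  rw [show (0:Int) = ((0:Nat):Int) by norm_num, PySem.List.pyGet?_natCast]
  exact (List.head?_eq_getElem? ..).symm

lemma pvCutLeft_eq (lt : List Char) : ∀ ms : List (List Char),
    pvACutLeft lt ms =
      (match ms.find? (fun m => PySem.Chars.rfind lt m != -1) with
       | some m => PySem.List.slice lt (some (PySem.Chars.rfind lt m + m.length)) none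
       | none => lt) := by
  intro ms
  induction ms with
  | nil => rfl
  | cons m ms ih =>
      by_cases h : (PySem.Chars.rfind lt m != -1) = true
      · simp [pvACutLeft, h, List.find?_cons_of_pos]
      · simp only [Bool.not_eq_true] at h
        simp [pvACutLeft, h, List.find?_cons_of_neg, ih]

lemma pvCutRight_eq (rt : List Char) : ∀ ms : List (List Char),
    pvACutRight rt ms =
      (match ms.find? (fun m => PySem.Chars.find rt m != -1) with
       | some m => PySem.List.slice rt none (some (PySem.Chars.find rt m))
       | none => rt) := by
  intro ms
  induction ms with
  | nil => rfl
  | cons m ms ih =>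
      by_cases h : (PySem.Chars.find rt m != -1) = true
      · simp [pvACutRight, h, List.find?_cons_of_pos]
      · simp only [Bool.not_eq_true] at h
        simp [pvACutRight, h, List.find?_cons_of_neg, ih]

lemma pvLeft_texts_eq (cs : List Char) (idx : Int) (h0 : 0 ≤ idx) (h1 : idx ≤ cs.length) :
    PySem.List.slice cs (some (pvALeft cs (idx - 1) + 1)) (some idx) =
      (PySem.List.pyGet? (pvSegs (PySem.List.slice cs none (some idx))) (-1)).getD [] := by
  obtain ⟨n, rfl⟩ : ∃ n : Nat, idx = (n : Int) := ⟨idx.toNat, by omega⟩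
  have hn : n ≤ cs.length := by exact_mod_cast h1
  rw [PySem.List.slice_to cs h0, show ((n:Int)).toNat = n by omega, pvSegs_eq]
  have hne : pvSegsFrom [] (cs.take n) ≠ [] := by
    intro hnil
    have := pvSegsFrom_head (cs.take n) []
    rw [hnil] at this; simp at this
  rw [pvGet_neg_one _ hne, pvSegsFrom_last, pvALeft_spec cs n hn]
  by_cases hany : (cs.take n).any pvBnd = true
  · rw [if_pos hany]; rfl
  · rw [if_neg hany]
    simp only [Option.getD_some, List.nil_append]
    unfold pvLastClause
    rw [List.takeWhile_eq_self_iff.2, List.reverse_reverse]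
    intro x hx
    simp only [List.mem_reverse] at hx
    have hb : pvBnd x = false := by
      rcases Bool.eq_false_or_eq_true (pvBnd x) with h | h
      · exact absurd (List.any_eq_true.2 ⟨x, hx, h⟩) hany
      · exact h
    simp [pvNB, hb]

lemma pvRight_texts_eq (cs : List Char) (j : Int) (h0 : 0 ≤ j) :
    PySem.List.slice cs (some j) (some (pvARight cs j)) =
      (PySem.List.pyGet? (pvSegs (PySem.List.slice cs (some j) none)) 0).getD [] := by
  obtain ⟨m, rfl⟩ : ∃ m : Nat, j = (m : Int) := ⟨j.toNat, by omega⟩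
  rw [PySem.List.slice_from cs h0, show ((m:Int)).toNat = m by omega, pvSegs_eq]
  rw [pvGet_zero, pvSegsFrom_head, pvARight_spec cs cs.length m (by omega)]
  simp

-- ===== VERDICT (by name: the statement is the Claim_ definition above) =====
theorem get_bounded_clause_text_py_spec : Claim_equal_get_bounded_clause_text_py := by
  intro text_lower idx plen bo _ hpre
  obtain ⟨h0, h1, h3⟩ := hpre
  unfold Spec_get_bounded_clause_text_py get_bounded_clause_text_py get_bounded_clause_text_py_alt
  simp only [PySem.Str.len_eq] at h1
  dsimp only
  rw [pvLeft_texts_eq text_lower.toList idx h0 (by exact_mod_cast h1), pvCutLeft_eq]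
  cases bo with
  | true => simp
  | false =>
      have hj : 0 ≤ idx + plen := by
        rcases h3 with h | h
        · exact absurd h (by simp)
        · exact h
      rw [pvRight_texts_eq text_lower.toList (idx + plen) hj, pvCutRight_eq]
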